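-- pv_equiv track=rewrite | github.com/flying-adventure/baekjoon | 프로그래머스/0/181932. 코드 처리하기/코드 처리하기.py | solution
-- ===== SOURCE A (Python) =====
-- def solution(code):
--     mode=0
--     ret=[]
--     for i,x in enumerate(code):
--         if x=="1":
--             mode=1-mode
--             continue
--         if mode==0:
--             if i%2==0:
--                 ret.append(x)
--         if mode==1:
--             if i%2!=0:
--                 ret.append(x)
--     ans="".join(ret)
--     return ans if ans else "EMPTY"
-- ===== SOURCE B (Python) =====
-- def solution(code):
--     # A non-'1' char survives iff its position among the non-'1' chars is even,
--     # so: drop the '1's, then take every other remaining char.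
--     filtered = [c for c in code if c != '1']
--     kept = ''.join(filtered[::2])
--     return kept if kept else "EMPTY"
-- ===== Notes on version B (the rewrite author's own statement) =====
-- stated objective: faster
-- what changed: Replaces A's single pass with a toggled mode flag and absolute-index parity tests by two staged passes: filter out every '1', then take every other char of the remainder ([::2]); correct because a kept char's absolute index minus the count of '1's before it is exactly its position in the filtered list.
import Mathlib
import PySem

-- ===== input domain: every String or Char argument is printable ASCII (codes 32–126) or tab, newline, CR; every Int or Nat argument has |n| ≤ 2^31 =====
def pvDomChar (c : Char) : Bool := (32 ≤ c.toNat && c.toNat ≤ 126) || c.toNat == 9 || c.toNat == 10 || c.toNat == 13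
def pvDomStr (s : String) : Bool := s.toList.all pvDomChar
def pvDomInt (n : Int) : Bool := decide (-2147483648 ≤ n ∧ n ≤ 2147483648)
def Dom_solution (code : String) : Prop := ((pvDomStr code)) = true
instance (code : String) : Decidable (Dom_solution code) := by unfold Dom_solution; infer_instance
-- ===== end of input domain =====

-- B replaces A's mode-toggling single pass by two staged passes: filter out the '1'
-- characters, then keep every other char of the remainder (objective: alternative).

-- ===== PORT A =====
-- literal port of A's loop: index, mode, accumulated ret
def solGoA : List Char → Int → Int → List Char → List Char
  | [], _, _, ret => ret
  | x :: rest, i, mode, ret =>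
    if x = '1' then
      solGoA rest (i + 1) (1 - mode) ret
    else
      let ret1 := if mode = 0 ∧ i % 2 = 0 then ret ++ [x] else ret
      let ret2 := if mode = 1 ∧ ¬ i % 2 = 0 then ret1 ++ [x] else ret1
      solGoA rest (i + 1) mode ret2

def solution (code : String) : String :=
  let ans := solGoA code.toList 0 0 []
  if ans = [] then "EMPTY" else String.ofList ans

-- ===== PORT B =====
def solution_alt (code : String) : String :=
  let filtered := code.toList.filter (fun c => c ≠ '1')
  -- filtered[::2]; step 2 ≠ 0, so slice? always returns some (getD's default is unreachable)
  let kept := (PySem.List.slice? filtered none none 2).getD []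
  if kept = [] then "EMPTY" else String.ofList kept

-- ===== PRECONDITION & SPEC =====
def Spec_solution (code : String) (out : String) : Prop := out = solution_alt code
instance (code : String) (out : String) : Decidable (Spec_solution code out) := by unfold Spec_solution; infer_instance

-- ===== CLAIM =====
def Claim_equal_solution : Prop := ∀ (code : String), Dom_solution code → Spec_solution code (solution code)

-- ===== LEMMAS AND PROOFS =====

-- proof-side form of A: chars kept from position i onward, p = parity of '1's seen so far
def solKept : List Char → Int → Int → List Char
  | [], _, _ => []
  | x :: rest, i, p =>
    let p' := if x = '1' then 1 - p else p
    if x ≠ '1' ∧ i % 2 = p' then x :: solKept rest (i + 1) p'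
    else solKept rest (i + 1) p'

lemma solGoA_eq_kept (cs : List Char) : ∀ (i p : Int) (ret : List Char),
    p = 0 ∨ p = 1 → solGoA cs i p ret = ret ++ solKept cs i p := by
  induction cs with
  | nil => intro i p ret _; simp [solGoA, solKept]
  | cons x rest ih =>
    intro i p ret hp
    have h2 : i % 2 = 0 ∨ i % 2 = 1 := Int.emod_two_eq_zero_or_one i
    rcases hp with hp | hp <;> subst hp <;> by_cases hx : x = '1'
    · simp only [solGoA, solKept, hx]
      rw [ih _ _ _ (by norm_num)]; simp
    · simp only [solGoA, solKept, if_neg hx]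
      rcases h2 with h2 | h2 <;> simp [hx, h2, ih _ _ _ (Or.inl rfl)]
    · simp only [solGoA, solKept, hx]
      rw [ih _ _ _ (by norm_num)]; simp
    · simp only [solGoA, solKept, if_neg hx]
      rcases h2 with h2 | h2 <;> simp [hx, h2, ih _ _ _ (Or.inr rfl)]

-- keep-every-other, starting with keep = b
def solPick : List Char → Bool → List Char
  | [], _ => []
  | x :: rest, b => if b then x :: solPick rest (!b) else solPick rest (!b)

lemma solKept_eq_pick (cs : List Char) : ∀ (i p : Int), p = 0 ∨ p = 1 →
    solKept cs i p = solPick (cs.filter (fun c => c ≠ '1')) (decide (i % 2 = p)) := by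
  induction cs with
  | nil => intro i p _; simp [solKept, solPick]
  | cons x rest ih =>
    intro i p hp
    have h2 : i % 2 = 0 ∨ i % 2 = 1 := Int.emod_two_eq_zero_or_one i
    have h2' : (i + 1) % 2 = 1 - i % 2 := by omega
    by_cases hx : x = '1'
    · -- '1': dropped on both sides; new parity 1 - p keeps the flag value
      have : decide ((i + 1) % 2 = 1 - p) = decide (i % 2 = p) := by
        rcases hp with hp | hp <;> subst hp <;> rcases h2 with h2 | h2 <;> simp [h2, h2']
      simp [solKept, hx, ih (i+1) (1-p) (by rcases hp with hp | hp <;> subst hp <;> norm_num),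
            this]
    · have hflip : decide ((i + 1) % 2 = p) = !decide (i % 2 = p) := by
        rcases hp with hp | hp <;> subst hp <;> rcases h2 with h2 | h2 <;> simp [h2, h2']
      by_cases hk : i % 2 = p
      · simp [solKept, hx, hk, solPick, ih (i+1) p hp, hflip]
      · simp [solKept, hx, hk, solPick, ih (i+1) p hp, hflip]

-- xs[::2] = solPick xs true
theorem solKey (xs : List Char) :
    (List.range (((xs.length : Int) + 1) / 2).toNat).filterMap
      (fun (k : Nat) => xs[(2 * (k : Int)).toNat]?) = solPick xs true := by
  match xs with
  | [] => simp [solPick]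
  | [x] => simp [solPick]
  | x :: y :: r =>
    have ih := solKey r
    have hc : ((((x :: y :: r).length : Int) + 1) / 2).toNat
        = (((r.length : Int) + 1) / 2).toNat + 1 := by
      simp only [List.length_cons]; omega
    rw [hc, List.range_succ_eq_map, List.filterMap_cons, List.filterMap_map]
    have hidx : ∀ k : Nat, (x :: y :: r)[(2 * ((k + 1 : Nat) : Int)).toNat]?
        = r[(2 * (k : Int)).toNat]? := by
      intro k
      have h1 : (2 * ((k + 1 : Nat) : Int)).toNat = (2 * (k : Int)).toNat + 2 := by omega
      rw [h1]; rfl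
    have hf : (fun k : Nat => (x :: y :: r)[(2 * ((k + 1 : Nat) : Int)).toNat]?)
        = fun (k : Nat) => r[(2 * (k : Int)).toNat]? := funext hidx
    simp only [Function.comp_def, hf]
    simp [ih, solPick]
termination_by xs.length

theorem solSlice_two (xs : List Char) :
    PySem.List.slice? xs none none 2 = some (solPick xs true) := by
  have h := solKey xs
  simp only [PySem.List.slice?, PySem.List.sliceIndices]
  norm_num
  rw [show ((xs.length : Int) + 2 - 1) = ((xs.length : Int) + 1) by ring]
  split_ifs with hlt
  · exact h
  · have : xs = [] := by
      cases xs with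
      | nil => rfl
      | cons a t => exfalso; simp at hlt
    subst this; simp [solPick]

-- ===== VERDICT =====
theorem solution_spec : Claim_equal_solution := by
  intro code _
  unfold Spec_solution solution solution_alt
  rw [solGoA_eq_kept _ _ _ _ (Or.inl rfl), solKept_eq_pick _ _ _ (Or.inl rfl)]
  simp [solSlice_two]
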